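-- pv_equiv track=rewrite | github.com/1ocalhost/wget-asm | wget-asm.py | echo_encode
-- ===== SOURCE A (Python) =====
-- def echo_encode(data):
--     table = {
--         0x07: 'a',
--         0x08: 'b',
--         0x09: 't',
--         0x0A: 'n',
--         0x0B: 'v',
--         0x0C: 'f',
--         0x0D: 'r',
--         0x1B: 'E',
--         0x1B: 'E',
--         0x5C: '\\',
--     }
--
--     result = ''
--     for i in data:
--         if i in table:
--             result += f'\\{table[i]}'
--         elif 0x20 <= i <= 0x7E and i != ord("\'"):
--             result += chr(i)
--         else:
--             result += f'\\x{"%02x" % i}'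
--
--     return f"echo -ne '{result}'"
-- ===== SOURCE B (Python) =====
-- def echo_encode(data):
--     ESC = "abtnvfr"
--     parts = []
--     n = len(data)
--     i = 0
--     while i < n:
--         b = data[i]
--         if 0x20 <= b <= 0x7E and b != 0x27 and b != 0x5C:
--             j = i
--             while j < n and 0x20 <= data[j] <= 0x7E and data[j] != 0x27 and data[j] != 0x5C:
--                 j += 1
--             parts.append(''.join(map(chr, data[i:j])))
--             i = j
--         else:
--             if 7 <= b <= 13:
--                 parts.append('\\' + ESC[b - 7])
--             elif b == 0x1B:
--                 parts.append('\\E')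
--             elif b == 0x5C:
--                 parts.append('\\\\')
--             else:
--                 parts.append('\\x%02x' % b)
--             i += 1
--     return "echo -ne '" + ''.join(parts) + "'"
-- ===== Notes on version B (the rewrite author's own statement) =====
-- stated objective: alternative
-- what changed: Replaces A's per-byte dict-lookup branch with a two-pointer run segmentation: maximal runs of plain printable bytes are emitted as one chr-joined chunk, escapes (7..13 indexed into the string 'abtnvfr', ESC, backslash, hex) emitted individually, and the chunks joined once at the end.
import Mathlib
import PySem

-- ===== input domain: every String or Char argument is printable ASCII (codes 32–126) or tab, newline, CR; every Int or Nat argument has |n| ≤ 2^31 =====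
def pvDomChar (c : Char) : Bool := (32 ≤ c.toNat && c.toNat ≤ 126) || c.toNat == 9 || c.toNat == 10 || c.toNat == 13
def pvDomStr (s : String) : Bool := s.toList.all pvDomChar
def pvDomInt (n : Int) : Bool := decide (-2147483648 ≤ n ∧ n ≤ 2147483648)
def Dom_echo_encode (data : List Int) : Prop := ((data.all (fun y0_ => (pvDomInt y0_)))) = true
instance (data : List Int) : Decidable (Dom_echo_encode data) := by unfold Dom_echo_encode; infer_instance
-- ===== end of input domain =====

-- B replaces A's per-byte dict-lookup loop with two-pointer run segmentation: maximal runs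
-- of plain printable bytes become one chunk, escapes are emitted individually (alternative
-- decomposition, same cost).


-- ===== PORT A =====
-- exact port of Python's '"%02x" % i' (width 2, zero-padded, lowercase; '-' then the
-- digits for a negative i — sign plus at least one digit already fills width 2)
def pvPct02x (i : Int) : String :=
  if i < 0 then "-" ++ String.ofList (Nat.toDigits 16 (-i).toNat)
  else
    let ds := Nat.toDigits 16 i.toNat
    String.ofList (List.replicate (2 - ds.length) '0' ++ ds)

-- A's literal dict (the duplicate 0x1B entry included, overwrite-in-place)
def pvTableA : PySem.Dict Int String :=
  ((((((((((PySem.Dict.empty.insert 0x07 "a").insert 0x08 "b").insert 0x09 "t").insert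
      0x0A "n").insert 0x0B "v").insert 0x0C "f").insert 0x0D "r").insert 0x1B "E").insert
      0x1B "E").insert 0x5C "\\")

-- A's loop body: the piece appended to `result` for one element i
def pvFragA (i : Int) : String :=
  if pvTableA.contains i then "\\" ++ (pvTableA.get? i).getD ""
  else if 0x20 ≤ i ∧ i ≤ 0x7E ∧ i ≠ 0x27 then (Char.ofNat i.toNat).toString
  else "\\x" ++ pvPct02x i

def echo_encode (data : List Int) : String :=
  let result := data.foldl (fun r i => r ++ pvFragA i) ""
  "echo -ne '" ++ result ++ "'"

-- ===== PORT B =====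
-- Source B's plain-byte test: printable, not apostrophe, not backslash
def pvPlain (b : Int) : Bool :=
  decide (0x20 ≤ b) && decide (b ≤ 0x7E) && decide (b ≠ 0x27) && decide (b ≠ 0x5C)

-- Source B's escape emitter for a non-plain byte (ESC[b-7] indexing into "abtnvfr")
def pvEscB (b : Int) : String :=
  if 7 ≤ b ∧ b ≤ 13 then
    "\\" ++ (PySem.List.pyGetD "abtnvfr".toList (b - 7) ' ').toString
  else if b = 0x1B then "\\E"
  else if b = 0x5C then "\\\\"
  else "\\x" ++ pvPct02x b

-- Source B's outer while-loop: peel either a maximal plain run (appended as one chunk)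
-- or one escaped byte, collecting the chunks
def pvChunks : List Int → List String
  | [] => []
  | b :: rest =>
    if pvPlain b then
      let run := List.takeWhile pvPlain (b :: rest)
      String.ofList (run.map (fun x => Char.ofNat x.toNat)) ::
        pvChunks (List.dropWhile pvPlain (b :: rest))
    else
      pvEscB b :: pvChunks rest
  termination_by l => l.length
  decreasing_by
    · simp only [List.dropWhile]
      simp_all
      exact List.length_dropWhile_le pvPlain rest
    · simp

def echo_encode_alt (data : List Int) : String :=
  "echo -ne '" ++ String.join (pvChunks data) ++ "'"

-- ===== PRECONDITION & SPEC =====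
def Spec_echo_encode (data : List Int) (out : String) : Prop := out = echo_encode_alt data
instance (data : List Int) (out : String) : Decidable (Spec_echo_encode data out) := by unfold Spec_echo_encode; infer_instance

-- ===== CLAIM (what is proved, stated in full; the proofs are below) =====
def Claim_equal_echo_encode : Prop := ∀ (data : List Int), Dom_echo_encode data → Spec_echo_encode data (echo_encode data)

-- ===== LEMMAS AND PROOFS =====
theorem pvTableA_contains_eq_false {i : Int}
    (h : ¬ (7 ≤ i ∧ i ≤ 13) ∧ i ≠ 0x1B ∧ i ≠ 0x5C) :
    pvTableA.contains i = false := by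
  obtain ⟨h1, h2, h3⟩ := h
  have h7 : (i == (0x07 : Int)) = false := by simp; omega
  have h8 : (i == (0x08 : Int)) = false := by simp; omega
  have h9 : (i == (0x09 : Int)) = false := by simp; omega
  have hA : (i == (0x0A : Int)) = false := by simp; omega
  have hB : (i == (0x0B : Int)) = false := by simp; omega
  have hC : (i == (0x0C : Int)) = false := by simp; omega
  have hD : (i == (0x0D : Int)) = false := by simp; omega
  have hE : (i == (0x1B : Int)) = false := by simp [h2]
  have hS : (i == (0x5C : Int)) = false := by simp [h3]
  simp [pvTableA, PySem.Dict.contains_insert, PySem.Dict.contains_empty,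
    h7, h8, h9, hA, hB, hC, hD, hE, hS]

theorem pvFragA_plain {b : Int} (h : pvPlain b = true) :
    pvFragA b = (Char.ofNat b.toNat).toString := by
  simp only [pvPlain, Bool.and_eq_true, decide_eq_true_eq] at h
  obtain ⟨⟨⟨h1, h2⟩, h3⟩, h4⟩ := h
  have hc : pvTableA.contains b = false :=
    pvTableA_contains_eq_false ⟨by omega, by omega, h4⟩
  simp [pvFragA, hc, h1, h2, h3]

theorem pvFragA_escape {b : Int} (h : pvPlain b = false) :
    pvFragA b = pvEscB b := by
  simp only [pvPlain, Bool.and_eq_false_iff, decide_eq_false_iff_not, not_not,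
    ] at h
  by_cases h7 : 7 ≤ b ∧ b ≤ 13
  · have : b = 7 ∨ b = 8 ∨ b = 9 ∨ b = 10 ∨ b = 11 ∨ b = 12 ∨ b = 13 := by omega
    rcases this with h | h | h | h | h | h | h <;> subst h <;> decide
  · by_cases hE : b = 0x1B
    · subst hE; decide
    · by_cases hS : b = 0x5C
      · subst hS; decide
      · have hc : pvTableA.contains b = false :=
          pvTableA_contains_eq_false ⟨h7, hE, hS⟩
        have hnp : ¬ (0x20 ≤ b ∧ b ≤ 0x7E ∧ b ≠ 0x27) := by
          rcases h with (((h | h) | h) | h) <;> omega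
        simp [pvFragA, pvEscB, hc, hnp, h7, hE, hS]

theorem pvFoldl_append (l : List String) (a : String) :
    List.foldl (fun r t => r ++ t) a l = a ++ String.join l := by
  induction l generalizing a with
  | nil => simp [String.join]
  | cons x xs ih =>
      have hj : String.join (x :: xs) = x ++ String.join xs := by
        have hx := ih x
        unfold String.join
        unfold String.join at hx
        rw [List.foldl_cons, show ("" ++ x : String) = x by simp]
        exact hx
      rw [List.foldl_cons, ih, hj]
      simp [String.append_assoc]

theorem pvJoin_cons (a : String) (l : List String) :
    String.join (a :: l) = a ++ String.join l := by
  simp only [String.join, List.foldl_cons]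
  rw [show ("" ++ a : String) = a by simp]
  exact pvFoldl_append l a

theorem pvJoin_append (l₁ l₂ : List String) :
    String.join (l₁ ++ l₂) = String.join l₁ ++ String.join l₂ := by
  induction l₁ with
  | nil => simp [String.join]
  | cons x xs ih => rw [List.cons_append, pvJoin_cons, pvJoin_cons, ih, String.append_assoc]

-- a run of plain bytes, fragment-encoded by A, concatenates to B's single chunk
theorem pvRun_join (run : List Int) (h : ∀ x ∈ run, pvPlain x = true) :
    String.join (run.map pvFragA) = String.ofList (run.map (fun x => Char.ofNat x.toNat)) := by
  induction run with
  | nil => simp [String.join]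
  | cons x xs ih =>
      have hx := h x (by simp)
      have hxs := ih (fun y hy => h y (by simp [hy]))
      rw [List.map_cons, pvJoin_cons, hxs, pvFragA_plain hx, List.map_cons]
      rw [show (Char.ofNat x.toNat).toString = String.ofList [Char.ofNat x.toNat] from rfl,
        ← String.ofList_append]
      rfl

-- the core equation: B's chunk list joins to the concatenation of A's fragments
theorem pvChunks_join (l : List Int) :
    String.join (pvChunks l) = String.join (l.map pvFragA) := by
  induction l using pvChunks.induct with
  | case1 => simp [pvChunks]
  | case2 b rest hb ih =>
      rw [pvChunks]
      simp only [hb, if_true]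
      have hsplit : (b :: rest).map pvFragA
          = (List.takeWhile pvPlain (b :: rest)).map pvFragA
            ++ (List.dropWhile pvPlain (b :: rest)).map pvFragA := by
        rw [← List.map_append, List.takeWhile_append_dropWhile]
      rw [hsplit, pvJoin_append, pvJoin_cons, ih,
        pvRun_join _ (fun x hx => List.mem_takeWhile_imp hx)]
  | case3 b rest hb ih =>
      rw [pvChunks]
      simp only [hb, if_false, Bool.false_eq_true]
      rw [pvJoin_cons, List.map_cons, pvJoin_cons, ih, pvFragA_escape (Bool.eq_false_iff.mpr hb)]

theorem pvFoldl_fragA (data : List Int) (s : String) :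
    data.foldl (fun r i => r ++ pvFragA i) s = s ++ String.join (data.map pvFragA) := by
  induction data generalizing s with
  | nil => simp [String.join]
  | cons x xs ih => rw [List.foldl_cons, ih, List.map_cons, pvJoin_cons, String.append_assoc]

-- ===== VERDICT (by name: the statement is the Claim_ definition above) =====
theorem echo_encode_spec : Claim_equal_echo_encode := by
  intro data _
  unfold Spec_echo_encode echo_encode echo_encode_alt
  rw [pvFoldl_fragA, pvChunks_join]
  rfl
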